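-- pv_equiv track=rewrite | github.com/ankush-poonia007/DSA-60-Day-Challenge | Day-19/solution.py | largestSwap
-- ===== SOURCE A (Python) =====
-- def largestSwap(s):
--     #code here
--     s = list(s)
--
--     n =  len ( s )
--
--     max_idx  = n - 1
--     left = right = -1
--
--
--
--     for i in range ( n-1 , -1 , -1 ):
--         if s[i] > s[max_idx]:
--             max_idx = i
--         elif s[i] < s[max_idx]:
--             left = i
--             right = max_idx
--
--     if left != -1 :
--         s[left] , s[right] = s[right] , s[left]
--
--     return "".join(s)
-- ===== SOURCE B (Python) =====
-- def largestSwap(s):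
--     # Two-phase re-implementation: precompute a suffix-maximum table
--     # (max char of t[i:] with its rightmost index), then scan left to
--     # right and swap at the first improvable position, stopping early.
--     t = list(s)
--     n = len(t)
--     if n == 0:
--         return ""
--     bc, bj = t[n - 1], n - 1
--     rev = [(bc, bj)]
--     for i in range(n - 2, -1, -1):
--         if t[i] > bc:
--             bc, bj = t[i], i
--         rev.append((bc, bj))
--     suf = rev[::-1]  # suf[i] = (max of t[i:], rightmost index where it occurs)
--     for i in range(n - 1):
--         c, j = suf[i + 1]
--         if c > t[i]:
--             t[i], t[j] = t[j], t[i]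
--             break
--     return "".join(t)
-- ===== Notes on version B (the rewrite author's own statement) =====
-- stated objective: alternative
-- what changed: Replaces A's single right-to-left register scan (which tracks the running max index and keeps overwriting the swap pair) by a two-phase algorithm: a precomputed suffix-maximum table, then a left-to-right scan that swaps at the first improvable position and stops early.
import Mathlib
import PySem

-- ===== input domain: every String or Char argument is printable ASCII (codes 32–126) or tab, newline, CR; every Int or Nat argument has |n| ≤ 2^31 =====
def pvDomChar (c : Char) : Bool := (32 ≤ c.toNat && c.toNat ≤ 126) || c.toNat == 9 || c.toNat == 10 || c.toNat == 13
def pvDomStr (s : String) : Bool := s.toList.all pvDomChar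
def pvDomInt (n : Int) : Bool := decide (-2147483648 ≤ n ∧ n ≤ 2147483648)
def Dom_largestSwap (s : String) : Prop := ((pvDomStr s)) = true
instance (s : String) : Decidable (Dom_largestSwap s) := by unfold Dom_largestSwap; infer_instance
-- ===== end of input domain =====

-- B replaces A's single right-to-left register scan by a two-phase algorithm (a precomputed
-- suffix-maximum table, then a left-to-right scan that swaps at the first improvable position
-- and stops early); equivalence of the two ports is proved for every input string.

-- ===== PORT A =====
def stepA (l : List Char) (st : Int × Int × Int) (i : Int) : Int × Int × Int :=
  match st with
  | (m, L, R) =>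
    let si := PySem.List.pyGetD l i ' '
    let sm := PySem.List.pyGetD l m ' '
    if si > sm then (i, L, R)
    else if si < sm then (m, i, m)
    else (m, L, R)

def largestSwap (s : String) : String :=
  let l := s.toList
  let n : Int := l.length
  match (PySem.List.pyRange (n - 1) (-1) (-1)).foldl (stepA l) (n - 1, -1, -1) with
  | (_, L, R) =>
    let l' := if L ≠ -1 then
        (l.set L.toNat (PySem.List.pyGetD l R ' ')).set R.toNat (PySem.List.pyGetD l L ' ')
      else l
    String.ofList l'

-- ===== PORT B =====
def stepB1 (l : List Char) (st : (Char × Int) × List (Char × Int)) (i : Int) : (Char × Int) × List (Char × Int) :=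
  match st with
  | ((bc, bj), rev) =>
    let ti := PySem.List.pyGetD l i ' '
    let b' := if ti > bc then (ti, i) else (bc, bj)
    (b', rev ++ [b'])

def stepB2 (l : List Char) (suf : List (Char × Int)) (st : Option (List Char)) (i : Int) : Option (List Char) :=
  match st with
  | some r => some r
  | none =>
    match PySem.List.pyGetD suf (i + 1) (' ', 0) with
    | (c, j) =>
      if c > PySem.List.pyGetD l i ' ' then
        some ((l.set i.toNat (PySem.List.pyGetD l j ' ')).set j.toNat (PySem.List.pyGetD l i ' '))
      else none

def largestSwap_alt (s : String) : String :=
  let t := s.toList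
  let n : Int := t.length
  if n = 0 then "" else
    let c0 := PySem.List.pyGetD t (n - 1) ' '
    let rev := ((PySem.List.pyRange (n - 2) (-1) (-1)).foldl (stepB1 t) ((c0, n - 1), [(c0, n - 1)])).2
    let suf := rev.reverse
    let res := (PySem.List.pyRange 0 (n - 1) 1).foldl (stepB2 t suf) none
    String.ofList (res.getD t)
-- (max char, rightmost index where it occurs) of l.drop k, index absolute

-- ===== PRECONDITION & SPEC =====
def Spec_largestSwap (s : String) (out : String) : Prop := out = largestSwap_alt s
instance (s : String) (out : String) : Decidable (Spec_largestSwap s out) := by unfold Spec_largestSwap; infer_instance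

-- ===== CLAIM (what is proved, stated in full; the proofs are below) =====
def Claim_equal_largestSwap : Prop := ∀ (s : String), Dom_largestSwap s → Spec_largestSwap s (largestSwap s)

-- ===== LEMMAS AND PROOFS =====
theorem pyGetD_cons_add_one (c : Char) (t : List Char) (i : Int) (h : 0 ≤ i) (d : Char) :
    PySem.List.pyGetD (c :: t) (i + 1) d = PySem.List.pyGetD t i d := by
  obtain ⟨n, rfl⟩ : ∃ n : Nat, i = (n : Int) := ⟨i.toNat, (Int.toNat_of_nonneg h).symm⟩
  have : ((n : Int) + 1) = ((n + 1 : Nat) : Int) := by push_cast; ring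
  rw [this, PySem.List.pyGetD_natCast, PySem.List.pyGetD_natCast]
  rfl

def shI (x : Int) : Int := if x < 0 then x else x + 1

def shSt (st : Int × Int × Int) : Int × Int × Int := (st.1 + 1, shI st.2.1, shI st.2.2)

def FA : List Char → Int × Int × Int
  | [] => (-1, -1, -1)
  | c :: t =>
    let st := shSt (FA t)
    let cm := PySem.List.pyGetD (c :: t) st.1 ' '
    if c > cm then (0, st.2.1, st.2.2)
    else if c < cm then (st.1, 0, st.1)
    else st

theorem stepA_shift (c : Char) (t : List Char) (k : Nat) (st : Int × Int × Int) (h : 0 ≤ st.1) :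
    stepA (c :: t) (shSt st) ((k : Int) + 1) = shSt (stepA t st (k : Int)) := by
  obtain ⟨m, L, R⟩ := st
  simp only [stepA, shSt]
  rw [pyGetD_cons_add_one c t m h, pyGetD_cons_add_one c t (k : Int) (Int.natCast_nonneg k)]
  split_ifs <;> simp [shI] <;> omega

theorem stepA_fst_nonneg (l : List Char) (st : Int × Int × Int) (k : Nat) (h : 0 ≤ st.1) :
    0 ≤ (stepA l st (k : Int)).1 := by
  obtain ⟨m, L, R⟩ := st
  simp only [stepA]
  split_ifs <;> simp <;> omega

theorem foldr_stepA_shift (c : Char) (t : List Char) (ks : List Nat) (st : Int × Int × Int) (h : 0 ≤ st.1) :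
    ks.foldr (fun (k : Nat) acc => stepA (c :: t) acc ((k : Int) + 1)) (shSt st)
      = shSt (ks.foldr (fun (k : Nat) acc => stepA t acc (k : Int)) st)
    ∧ 0 ≤ (ks.foldr (fun (k : Nat) acc => stepA t acc (k : Int)) st).1 := by
  induction ks with
  | nil => exact ⟨rfl, h⟩
  | cons k ks ih =>
    simp only [List.foldr_cons]
    exact ⟨by rw [ih.1]; exact stepA_shift c t k _ ih.2, stepA_fst_nonneg t _ k ih.2⟩

theorem foldA_eq_FA (l : List Char) :
    (List.range l.length).foldr (fun (k : Nat) st => stepA l st (k : Int)) ((l.length : Int) - 1, -1, -1) = FA l := by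
  induction l with
  | nil => rfl
  | cons c t ih =>
    simp only [List.length_cons, List.range_succ_eq_map, List.foldr_cons, List.foldr_map]
    have hcast : ∀ (k : Nat) (st : Int × Int × Int),
        stepA (c :: t) st ((k.succ : Nat) : Int) = stepA (c :: t) st ((k : Int) + 1) := by
      intro k st; norm_cast
    have hinit : ((t.length + 1 : Nat) : Int) - 1 = ((t.length : Int) - 1) + 1 := by push_cast; ring
    rcases eq_or_ne t [] with rfl | ht
    · simp [stepA, FA, shSt, shI, PySem.List.pyGetD_zero_cons]
    · have hlen : 0 ≤ (t.length : Int) - 1 := by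
        have : 1 ≤ t.length := List.length_pos_of_ne_nil ht
        omega
      simp only [hcast]
      have e : (((t.length + 1 : Nat) : Int) - 1, (-1 : Int), (-1 : Int)) = shSt ((t.length : Int) - 1, -1, -1) := by
        simp [shSt, shI]
      rw [e, (foldr_stepA_shift c t _ _ hlen).1, ih]
      rcases hFA : FA t with ⟨m, L, R⟩
      simp only [stepA, FA, shSt, hFA, Nat.cast_zero, PySem.List.pyGetD_zero_cons]

def rmx : List Char → Char × Nat
  | [] => (' ', 0)
  | c :: t => if t = [] then (c, 0) else (if c > (rmx t).1 then (c, 0) else ((rmx t).1, (rmx t).2 + 1))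

theorem rmx_idx_lt (l : List Char) (h : l ≠ []) : (rmx l).2 < l.length := by
  induction l with
  | nil => simp at h
  | cons c t ih =>
    rcases eq_or_ne t [] with rfl | ht
    · simp [rmx]
    · have := ih ht
      simp only [rmx, if_neg ht, List.length_cons]
      split_ifs <;> simp <;> omega

theorem rmx_get (l : List Char) (h : l ≠ []) :
    PySem.List.pyGetD l ((rmx l).2 : Int) ' ' = (rmx l).1 := by
  induction l with
  | nil => simp at h
  | cons c t ih =>
    rcases eq_or_ne t [] with rfl | ht
    · simp [rmx, PySem.List.pyGetD_zero_cons]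
    · simp only [rmx, if_neg ht]
      split_ifs with hgt
      · simp [PySem.List.pyGetD_zero_cons]
      · dsimp only
        have hc : (((rmx t).2 + 1 : Nat) : Int) = ((rmx t).2 : Int) + 1 := by push_cast; ring
        rw [hc, pyGetD_cons_add_one c t _ (Int.natCast_nonneg _)]
        exact ih ht

theorem FA_fst (l : List Char) (h : l ≠ []) : (FA l).1 = ((rmx l).2 : Int) := by
  induction l with
  | nil => simp at h
  | cons c t ih =>
    rcases eq_or_ne t [] with rfl | ht
    · simp [FA, rmx, shSt, shI, PySem.List.pyGetD_zero_cons]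
    · have hm : (shSt (FA t)).1 = ((rmx t).2 : Int) + 1 := by
        simp [shSt, ih ht]
      have hcm : PySem.List.pyGetD (c :: t) (shSt (FA t)).1 ' ' = (rmx t).1 := by
        rw [hm, pyGetD_cons_add_one c t _ (Int.natCast_nonneg _), rmx_get t ht]
      simp only [FA, hcm, rmx, if_neg ht]
      split_ifs <;> simp [hm] <;> push_cast <;> ring

theorem FA_cons (c : Char) (t : List Char) (ht : t ≠ []) :
    FA (c :: t) = if c > (rmx t).1 then (0, shI (FA t).2.1, shI (FA t).2.2)
      else if c < (rmx t).1 then (((rmx t).2 : Int) + 1, 0, ((rmx t).2 : Int) + 1)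
      else (((rmx t).2 : Int) + 1, shI (FA t).2.1, shI (FA t).2.2) := by
  have hm : (shSt (FA t)).1 = ((rmx t).2 : Int) + 1 := by
    simp [shSt, FA_fst t ht]
  have hcm : PySem.List.pyGetD (c :: t) (shSt (FA t)).1 ' ' = (rmx t).1 := by
    rw [hm, pyGetD_cons_add_one c t _ (Int.natCast_nonneg _), rmx_get t ht]
  simp only [FA]
  rw [hcm]
  split_ifs <;> simp [shSt, FA_fst t ht]

theorem FA_snd (l : List Char) :
    ((FA l).2.1 = -1 ∧ (FA l).2.2 = -1) ∨ (0 ≤ (FA l).2.1 ∧ 0 ≤ (FA l).2.2) := by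
  induction l with
  | nil => simp [FA]
  | cons c t ih =>
    rcases eq_or_ne t [] with rfl | ht
    · simp [FA, shSt, shI, PySem.List.pyGetD_zero_cons]
    · rw [FA_cons c t ht]
      split_ifs
      · rcases ih with ⟨h1, h2⟩ | ⟨h1, h2⟩ <;> simp [shI, h1, h2] <;> right <;> omega
      · simp
        positivity
      · rcases ih with ⟨h1, h2⟩ | ⟨h1, h2⟩ <;> simp [shI, h1, h2] <;> right <;> omega

theorem set_set_split (l : List Char) (i k : Nat) (x y : Char) (h : i < l.length) :
    (l.set i x).set (i + 1 + k) y = l.take i ++ x :: (l.drop (i + 1)).set k y := by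
  induction l generalizing i with
  | nil => simp at h
  | cons c t ih =>
    cases i with
    | zero =>
      have h0 : 0 + 1 + k = k + 1 := by omega
      simp [h0]
    | succ i =>
      have h1 : i + 1 + 1 + k = (i + 1 + k) + 1 := by omega
      simp only [List.set_cons_succ, h1, List.take_succ_cons, List.drop_succ_cons, List.cons_append]
      rw [← ih i (by simpa using h)]

def outRec : List Char → List Char
  | [] => []
  | c :: t => if t ≠ [] ∧ c < (rmx t).1 then (rmx t).1 :: t.set (rmx t).2 c else c :: outRec t

def outFA (l : List Char) : List Char :=
  match FA l with
  | (_, L, R) =>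
    if L ≠ -1 then
      (l.set L.toNat (PySem.List.pyGetD l R ' ')).set R.toNat (PySem.List.pyGetD l L ' ')
    else l

theorem outFA_eq_outRec (l : List Char) : outFA l = outRec l := by
  induction l with
  | nil => rfl
  | cons c t ih =>
    rcases eq_or_ne t [] with rfl | ht
    · simp [outFA, FA, shSt, shI, PySem.List.pyGetD_zero_cons, outRec]
    · rcases lt_trichotomy c (rmx t).1 with hlt | heq | hgt
      · -- improving at the head: swap 0 with rightmost max of t
        have hA := FA_cons c t ht
        rw [if_neg (by exact fun hh => absurd hlt (not_lt.mpr hh.le)), if_pos hlt] at hA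
        unfold outFA
        rw [hA]
        simp only [ne_eq]
        rw [if_pos (by norm_num)]
        have hR : ((rmx t).2 : Int) + 1 = (((rmx t).2 + 1 : Nat) : Int) := by push_cast; ring
        have hget : PySem.List.pyGetD (c :: t) (((rmx t).2 : Int) + 1) ' ' = (rmx t).1 := by
          rw [pyGetD_cons_add_one c t _ (Int.natCast_nonneg _), rmx_get t ht]
        rw [hget]
        simp only [PySem.List.pyGetD_zero_cons, Int.toNat_zero]
        have ht2 : (((rmx t).2 : Int) + 1).toNat = (rmx t).2 + 1 := by omega
        rw [ht2]
        have := set_set_split (c :: t) 0 ((rmx t).2) ((rmx t).1) c (by simp)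
        simp only [Nat.zero_add, List.take_zero, List.drop_succ_cons, List.drop_zero, List.nil_append] at this
        rw [Nat.add_comm 1 (rmx t).2] at this
        rw [this]
        rw [outRec, if_pos ⟨ht, hlt⟩]
      · -- equal: no improvement at head, recurse
        have hA := FA_cons c t ht
        rw [if_neg (by simp [heq]), if_neg (by simp [heq])] at hA
        rw [outRec, if_neg (by rintro ⟨-, hh⟩; exact absurd heq (ne_of_lt hh))]
        rw [← ih]
        unfold outFA
        rw [hA]
        rcases FA_snd t with ⟨h1, h2⟩ | ⟨h1, h2⟩
        · simp [shI, h1, h2]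
        · rcases hFA : FA t with ⟨m, L, R⟩
          simp only [hFA] at h1 h2 ⊢
          have hL1 : shI L = L + 1 := by simp only [shI]; split_ifs <;> omega
          have hR1 : shI R = R + 1 := by simp only [shI]; split_ifs <;> omega
          rw [hL1, hR1]
          rw [if_pos (by omega : ¬(L + 1 = -1))]
          rw [pyGetD_cons_add_one c t R h2, pyGetD_cons_add_one c t L h1]
          have e1 : (L + 1).toNat = L.toNat + 1 := by omega
          have e2 : (R + 1).toNat = R.toNat + 1 := by omega
          rw [e1, e2]
          simp only [List.set_cons_succ]
          congr 1
          rw [if_pos (by omega : ¬(L = -1))]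

      · -- head is strictly greater than all of t: no improvement at the head
        have hA := FA_cons c t ht
        rw [if_pos hgt] at hA
        rw [outRec, if_neg (by rintro ⟨-, hh⟩; exact absurd hh (not_lt.mpr hgt.le))]
        rw [← ih]
        unfold outFA
        rw [hA]
        rcases FA_snd t with ⟨h1, h2⟩ | ⟨h1, h2⟩
        · simp [shI, h1, h2]
        · rcases hFA : FA t with ⟨m, L, R⟩
          simp only [hFA] at h1 h2 ⊢
          have hL1 : shI L = L + 1 := by simp only [shI]; split_ifs <;> omega
          have hR1 : shI R = R + 1 := by simp only [shI]; split_ifs <;> omega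
          rw [hL1, hR1]
          rw [if_pos (by omega : ¬(L + 1 = -1))]
          rw [pyGetD_cons_add_one c t R h2, pyGetD_cons_add_one c t L h1]
          have e1 : (L + 1).toNat = L.toNat + 1 := by omega
          have e2 : (R + 1).toNat = R.toNat + 1 := by omega
          rw [e1, e2]
          simp only [List.set_cons_succ]
          congr 1
          rw [if_pos (by omega : ¬(L = -1))]

theorem foldlA_eq_FA (l : List Char) :
    (PySem.List.pyRange ((l.length : Int) - 1) (-1) (-1)).foldl (stepA l) ((l.length : Int) - 1, -1, -1) = FA l := by
  rw [PySem.List.pyRange_neg_one_eq_reverse]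
  norm_num
  rw [PySem.List.pyRange_one]
  rw [List.foldr_map]
  have : ((l.length : Int) - 0).toNat = l.length := by omega
  rw [this]
  have := foldA_eq_FA l
  simpa using this

theorem A_eq_outRec (s : String) : largestSwap s = String.ofList (outRec s.toList) := by
  unfold largestSwap
  simp only []
  rw [foldlA_eq_FA]
  rw [← outFA_eq_outRec]
  unfold outFA
  rcases FA s.toList with ⟨m, L, R⟩
  rfl

def bst (l : List Char) (k : Nat) : Char × Int :=
  ((rmx (l.drop k)).1, (k : Int) + ((rmx (l.drop k)).2 : Int))

theorem pyGetD_nat (l : List Char) (k : Nat) (h : k < l.length) (d : Char) :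
    PySem.List.pyGetD l (k : Int) d = l[k] := by
  rw [PySem.List.pyGetD_natCast]
  simp [List.getD_eq_getElem?_getD, h]

theorem bst_step (l : List Char) (k : Nat) (h : k + 1 < l.length) :
    (if PySem.List.pyGetD l (k : Int) ' ' > (bst l (k + 1)).1
     then (PySem.List.pyGetD l (k : Int) ' ', (k : Int)) else bst l (k + 1)) = bst l k := by
  have hk : k < l.length := by omega
  have hdrop : l.drop k = l[k] :: l.drop (k + 1) := List.drop_eq_getElem_cons hk
  have hne : l.drop (k + 1) ≠ [] := by
    intro hnil
    have := List.length_drop (l := l) (i := k + 1)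
    rw [hnil] at this
    simp at this
    omega
  rw [pyGetD_nat l k hk]
  unfold bst
  rw [hdrop]
  rw [show rmx (l[k] :: l.drop (k + 1))
      = if l[k] > (rmx (l.drop (k + 1))).1 then (l[k], 0)
        else ((rmx (l.drop (k + 1))).1, (rmx (l.drop (k + 1))).2 + 1) by
    rw [rmx, if_neg hne]]
  split_ifs
  · simp
  · simp
    push_cast
    ring

theorem phase1_aux (l : List Char) (k : Nat) (hk : k < l.length) :
    ∀ acc : List (Char × Int),
      (PySem.List.pyRange ((k : Int) - 1) (-1) (-1)).foldl (stepB1 l) (bst l k, acc)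
        = (bst l 0, acc ++ ((List.range k).map (bst l)).reverse) := by
  induction k with
  | zero =>
    intro acc
    rw [PySem.List.pyRange_neg_one_eq_nil (by norm_num)]
    simp
  | succ k ih =>
    intro acc
    have h1 : ((k + 1 : Nat) : Int) - 1 = (k : Int) := by push_cast; ring
    rw [h1, PySem.List.pyRange_neg_one_cons (by omega)]
    rw [List.foldl_cons]
    have hstep : stepB1 l (bst l (k + 1), acc) (k : Int) = (bst l k, acc ++ [bst l k]) := by
      unfold stepB1
      dsimp only
      rw [bst_step l k hk]
    rw [hstep]
    rw [ih (by omega) (acc ++ [bst l k])]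
    simp [List.range_succ]

theorem suf_spec (l : List Char) (h : l ≠ []) :
    (((PySem.List.pyRange ((l.length : Int) - 2) (-1) (-1)).foldl (stepB1 l)
        ((PySem.List.pyGetD l ((l.length : Int) - 1) ' ', (l.length : Int) - 1),
         [(PySem.List.pyGetD l ((l.length : Int) - 1) ' ', (l.length : Int) - 1)])).2).reverse
      = (List.range l.length).map (bst l) := by
  have hn : 1 ≤ l.length := List.length_pos_of_ne_nil h
  have hc : ((l.length : Int) - 1) = ((l.length - 1 : Nat) : Int) := by omega
  have hget : PySem.List.pyGetD l ((l.length : Int) - 1) ' ' = l[l.length - 1] := by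
    rw [hc, pyGetD_nat l (l.length - 1) (by omega)]
  have hbst : bst l (l.length - 1) = (l[l.length - 1], (l.length : Int) - 1) := by
    unfold bst
    have hdrop : l.drop (l.length - 1) = [l[l.length - 1]] := by
      rw [List.drop_eq_getElem_cons (by omega)]
      congr 1
      rw [List.drop_eq_nil_iff]
      omega
    rw [hdrop]
    simp [rmx]
    omega
  have h2 : (l.length : Int) - 2 = ((l.length - 1 : Nat) : Int) - 1 := by omega
  rw [hget, h2, ← hbst, phase1_aux l (l.length - 1) (by omega)]
  simp only [List.reverse_append, List.reverse_reverse, List.reverse_cons, List.reverse_nil]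
  have : (List.range l.length) = List.range (l.length - 1) ++ [l.length - 1] := by
    conv_lhs => rw [show l.length = (l.length - 1) + 1 by omega]
    rw [List.range_succ]
  rw [this]
  simp

theorem stepB2_some (l : List Char) (suf : List (Char × Int)) (r : List Char) (xs : List Int) :
    xs.foldl (stepB2 l suf) (some r) = some r := by
  induction xs with
  | nil => rfl
  | cons x xs ih => simpa [stepB2] using ih

theorem outRec_short (u : List Char) (h : u.length ≤ 1) : outRec u = u := by
  match u, h with
  | [], _ => rfl
  | [c], _ => simp [outRec]

theorem suf_get (l : List Char) (k : Nat) (h : k < l.length) :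
    PySem.List.pyGetD ((List.range l.length).map (bst l)) (k : Int) (' ', 0) = bst l k := by
  rw [PySem.List.pyGetD_natCast]
  rw [List.getD_eq_getElem?_getD]
  simp [h]

theorem phase2_spec (l : List Char) (d : Nat) :
    ∀ i : Nat, l.length ≤ i + d + 1 →
      (((PySem.List.pyRange (i : Int) ((l.length : Int) - 1) 1).foldl
          (stepB2 l ((List.range l.length).map (bst l))) none).getD l)
        = l.take i ++ outRec (l.drop i) := by
  induction d with
  | zero =>
    intro i hi
    rw [PySem.List.pyRange_one_eq_nil (by omega)]
    simp only [List.foldl_nil, Option.getD_none]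
    rw [outRec_short _ (by simp; omega)]
    exact (List.take_append_drop i l).symm
  | succ d ih =>
    intro i hi
    by_cases hcase : l.length ≤ i + 1
    · rw [PySem.List.pyRange_one_eq_nil (by omega)]
      simp only [List.foldl_nil, Option.getD_none]
      rw [outRec_short _ (by simp; omega)]
      exact (List.take_append_drop i l).symm
    · have hi1 : i + 1 < l.length := by omega
      have hiL : i < l.length := by omega
      rw [PySem.List.pyRange_one_cons (by omega)]
      rw [List.foldl_cons]
      have hsuf : PySem.List.pyGetD ((List.range l.length).map (bst l)) ((i : Int) + 1) (' ', 0)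
          = bst l (i + 1) := by
        have : ((i : Int) + 1) = ((i + 1 : Nat) : Int) := by push_cast; ring
        rw [this, suf_get l (i + 1) hi1]
      have hti : PySem.List.pyGetD l (i : Int) ' ' = l[i] := pyGetD_nat l i hiL ' '
      have hdropi : l.drop i = l[i] :: l.drop (i + 1) := List.drop_eq_getElem_cons hiL
      have hune : l.drop (i + 1) ≠ [] := by
        intro hnil
        have := List.length_drop (l := l) (i := i + 1)
        rw [hnil] at this
        simp at this
        omega
      by_cases himpr : (rmx (l.drop (i + 1))).1 > l[i]
      · -- first improvable position: swap and stop
        have hstep : stepB2 l ((List.range l.length).map (bst l)) none (i : Int)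
            = some ((l.set i ((rmx (l.drop (i + 1))).1)).set (i + 1 + (rmx (l.drop (i + 1))).2) l[i]) := by
          unfold stepB2
          rw [hsuf]
          dsimp only [bst]
          rw [hti, if_pos himpr]
          have hj : ((i + 1 : Nat) : Int) + ((rmx (l.drop (i + 1))).2 : Int)
              = ((i + 1 + (rmx (l.drop (i + 1))).2 : Nat) : Int) := by push_cast; ring
          have hk : (rmx (l.drop (i + 1))).2 < (l.drop (i + 1)).length := rmx_idx_lt _ hune
          have hjlt : i + 1 + (rmx (l.drop (i + 1))).2 < l.length := by
            have := List.length_drop (l := l) (i := i + 1)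
            omega
          have hgj : l[i + 1 + (rmx (l.drop (i + 1))).2] = (rmx (l.drop (i + 1))).1 := by
            have := rmx_get (l.drop (i + 1)) hune
            rw [pyGetD_nat _ _ hk] at this
            rw [← this]
            rw [List.getElem_drop]
          rw [hj, pyGetD_nat l _ hjlt, hgj]
          simp only [Int.toNat_natCast]
        rw [hstep, stepB2_some]
        simp only [Option.getD_some]
        rw [set_set_split l i _ _ _ hiL]
        rw [hdropi]
        rw [outRec, if_pos ⟨hune, himpr⟩]
      · -- not improvable here: step returns none, recurse
        have hstep : stepB2 l ((List.range l.length).map (bst l)) none (i : Int) = none := by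
          unfold stepB2
          rw [hsuf]
          dsimp only [bst]
          rw [hti, if_neg himpr]
        rw [hstep]
        have : ((i : Int) + 1) = ((i + 1 : Nat) : Int) := by push_cast; ring
        rw [this, ih (i + 1) (by omega)]
        rw [hdropi]
        rw [outRec, if_neg (by rintro ⟨-, hh⟩; exact himpr hh)]
        have htake : List.take (i + 1) l = List.take i l ++ [l[i]] := by
          rw [List.take_add_one]
          simp [List.getElem?_eq_getElem hiL]
        rw [htake]
        simp only [List.append_assoc, List.singleton_append]

theorem B_eq_outRec (s : String) : largestSwap_alt s = String.ofList (outRec s.toList) := by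
  unfold largestSwap_alt
  by_cases h0 : (s.toList.length : Int) = 0
  · have : s.toList = [] := by
      have : s.toList.length = 0 := by exact_mod_cast h0
      exact List.length_eq_zero_iff.mp this
    rw [if_pos h0, this]
    rfl
  · rw [if_neg h0]
    have hne : s.toList ≠ [] := by
      intro h
      exact h0 (by rw [h]; rfl)
    dsimp only
    rw [suf_spec s.toList hne]
    have := phase2_spec s.toList s.toList.length 0 (by omega)
    rw [Nat.cast_zero] at this
    rw [this]
    simp

-- ===== VERDICT (by name: the statement is the Claim_ definition above) =====
theorem largestSwap_spec : Claim_equal_largestSwap := by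
  intro s _
  unfold Spec_largestSwap
  rw [A_eq_outRec, B_eq_outRec]
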